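-- pv_equiv track=rewrite | github.com/Anshu17anand/Moonshot-Project | working_robot_stable.py | parse_voice_commands
-- ===== SOURCE A (Python) =====
-- VOICE_COMMANDS = [
--     "move left", "move right", "move up", "move down",
--     "stop", "lock target", "release lock",
--     "enable voice", "disable voice"
-- ]
--
-- def parse_voice_commands(text):
--     # Return only the latest command phrase inside the transcript to avoid early false positives
--     txt = " ".join(text.split())
--     best = None
--     best_idx = None
--     for phrase in VOICE_COMMANDS:
--         start = 0
--         while True:
--             idx = txt.find(phrase, start)
--             if idx == -1:
--                 break
--             if best_idx is None or idx >= best_idx: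
--                 best_idx = idx
--                 best = phrase
--             start = idx + len(phrase)
--     return [best] if best else []
-- ===== SOURCE B (Python) =====
-- VOICE_COMMANDS = [
--     "move left", "move right", "move up", "move down",
--     "stop", "lock target", "release lock",
--     "enable voice", "disable voice"
-- ]
--
-- def parse_voice_commands(text):
--     # One backward scan over positions: the first position (scanning from the
--     # end) where some command phrase starts is the latest command.
--     txt = " ".join(text.split())
--     for i in range(len(txt) - 1, -1, -1):
--         for phrase in reversed(VOICE_COMMANDS):
--             if txt.startswith(phrase, i):
--                 return [phrase]
--     return []
-- ===== Notes on version B (the rewrite author's own statement) =====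
-- stated objective: alternative
-- what changed: Instead of A's per-phrase find loops with best/best_idx bookkeeping, B makes a single backward scan over text positions and returns the first phrase (in reversed command order) that starts there, so no best-so-far state is kept.
import Mathlib
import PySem

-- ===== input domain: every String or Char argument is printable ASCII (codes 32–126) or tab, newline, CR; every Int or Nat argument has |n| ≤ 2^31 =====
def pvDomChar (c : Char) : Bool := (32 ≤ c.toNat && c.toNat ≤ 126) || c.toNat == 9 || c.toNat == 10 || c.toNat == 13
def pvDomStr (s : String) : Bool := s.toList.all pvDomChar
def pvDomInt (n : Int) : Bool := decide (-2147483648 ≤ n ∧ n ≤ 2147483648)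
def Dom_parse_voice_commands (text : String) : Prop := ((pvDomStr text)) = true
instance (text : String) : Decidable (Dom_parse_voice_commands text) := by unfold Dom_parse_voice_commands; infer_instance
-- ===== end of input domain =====

-- B replaces A's per-phrase find loops and best/best_idx bookkeeping by a single
-- backward scan over text positions returning the first phrase that starts there
-- (objective: alternative decomposition, no best-so-far state).

-- ===== PORT A =====
def VOICE_COMMANDS : List String :=
  ["move left", "move right", "move up", "move down",
   "stop", "lock target", "release lock",
   "enable voice", "disable voice"]

-- A's inner `while True: idx = txt.find(phrase, start); …` loop.
-- The dite condition is only a termination guard: it always holds when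
-- idx ≠ -1 and p ≠ [] (proved in the lemmas below), so the else-branch is
-- unreachable on A's actual calls.
def whileFind (txt p : List Char) (start : Nat)
    (best : Option (List Char)) (bestIdx : Option Nat) :
    Option (List Char) × Option Nat :=
  let idx := PySem.Chars.findFrom txt p (start : Int) none
  if idx = -1 then (best, bestIdx)
  else
    let i := idx.toNat
    let upd : Bool := match bestIdx with
      | none => true
      | some b => decide (b ≤ i)
    let best' := if upd then some p else best
    let bestIdx' := if upd then some i else bestIdx
    if _h : start < i + p.length ∧ i + p.length ≤ txt.length then
      whileFind txt p (i + p.length) best' bestIdx'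
    else (best', bestIdx')
termination_by txt.length + 1 - start
decreasing_by omega

def parse_voice_commands (text : String) : List String :=
  let txt := PySem.Chars.join [' '] (PySem.Chars.split₀ text.toList)
  let st := VOICE_COMMANDS.foldl
      (fun st p => whileFind txt p.toList 0 st.1 st.2)
      ((none, none) : Option (List Char) × Option Nat)
  match st.1 with
  | some b => if b.isEmpty then [] else [String.ofList b]
  | none => []

-- ===== PORT B =====
-- inner `for phrase in reversed(VOICE_COMMANDS): if txt.startswith(phrase, i): return [phrase]`
def bFindAt (txt : List Char) (i : Nat) : List (List Char) → Option (List Char)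
  | [] => none
  | p :: ps =>
    if PySem.Chars.startswith (txt.drop i) p then some p
    else bFindAt txt i ps

-- outer `for i in range(len(txt) - 1, -1, -1)` loop; argument = positions left
def bScan (txt : List Char) : Nat → Option (List Char)
  | 0 => none
  | j + 1 =>
    match bFindAt txt j ((VOICE_COMMANDS.map String.toList).reverse) with
    | some p => some p
    | none => bScan txt j

def parse_voice_commands_alt (text : String) : List String :=
  let txt := PySem.Chars.join [' '] (PySem.Chars.split₀ text.toList)
  match bScan txt txt.length with
  | some p => [String.ofList p]
  | none => []

-- ===== PRECONDITION & SPEC =====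
def Spec_parse_voice_commands (text : String) (out : List String) : Prop := out = parse_voice_commands_alt text
instance (text : String) (out : List String) : Decidable (Spec_parse_voice_commands text out) := by unfold Spec_parse_voice_commands; infer_instance

-- ===== CLAIM (what is proved, stated in full; the proofs are below) =====
def Claim_equal_parse_voice_commands : Prop := ∀ (text : String), Dom_parse_voice_commands text → Spec_parse_voice_commands text (parse_voice_commands text)

-- ===== LEMMAS AND PROOFS =====

-- the set of command phrases as char lists
def CMDSL : List (List Char) := VOICE_COMMANDS.map String.toList

def EV : List Char := "enable voice".toList

-- decidable facts about the literal command list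
theorem cmds_nonempty : ∀ p ∈ CMDSL, p ≠ [] := by unfold CMDSL VOICE_COMMANDS; decide

theorem cmds_len : ∀ p ∈ CMDSL, p.length ≤ 13 := by unfold CMDSL VOICE_COMMANDS; decide

theorem cmds_nonprefix : ∀ p ∈ CMDSL, ∀ q ∈ CMDSL, p <+: q → p = q := by
  unfold CMDSL VOICE_COMMANDS; decide

-- the only self-border among the phrases: "enable voice" at shift 11
theorem cmds_border : ∀ p ∈ CMDSL, ∀ d < p.length, 0 < d → p.drop d <+: p →
    p = EV ∧ d = 11 := by
  unfold CMDSL VOICE_COMMANDS EV; decide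

-- no phrase starts strictly inside an overlapped double "enable voice" window
theorem no_cmd_in_window : ∀ o < 11, 0 < o → ∀ p ∈ CMDSL,
    ¬ p <+: (EV ++ EV.drop 1).drop o := by
  unfold CMDSL VOICE_COMMANDS EV; decide

theorem uniq_at (t p q : List Char) (hp : p ∈ CMDSL) (hq : q ∈ CMDSL)
    (h1 : p <+: t) (h2 : q <+: t) : p = q := by
  rcases List.prefix_or_prefix_of_prefix h1 h2 with h | h
  · exact cmds_nonprefix p hp q hq h
  · exact (cmds_nonprefix q hq p hp h).symm

-- two close occurrences of the same phrase give a self-border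
theorem close_occ_border (txt p : List Char) {i j : Nat}
    (hij : i < j) (hjlt : j < i + p.length)
    (hi : p <+: txt.drop i) (hj : p <+: txt.drop j) : p.drop (j - i) <+: p := by
  obtain ⟨r, hr⟩ := hi
  have hdj : txt.drop j = p.drop (j - i) ++ r := by
    have : txt.drop j = (txt.drop i).drop (j - i) := by
      rw [List.drop_drop]; congr 1; omega
    rw [this, ← hr, List.drop_append_of_le_length (by omega)]
  rw [hdj] at hj
  rcases List.prefix_or_prefix_of_prefix hj (List.prefix_append _ r) with h | h
  · have := h.length_le
    simp [List.length_drop] at this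
    omega
  · exact h

-- no phrase starts strictly between two overlapped occurrences of "enable voice"
theorem no_cmd_inside (txt : List Char) (c : Nat)
    (h1 : EV <+: txt.drop c) (h2 : EV <+: txt.drop (c + 11)) :
    ∀ j, c < j → j < c + 11 → ∀ p ∈ CMDSL, ¬ p <+: txt.drop j := by
  obtain ⟨r1, hr1⟩ := h1
  have hEVcons : EV = 'e' :: EV.drop 1 := by decide
  have hdrop11 : txt.drop (c + 11) = 'e' :: r1 := by
    have h : txt.drop (c + 11) = (txt.drop c).drop 11 := by
      rw [List.drop_drop]
    rw [h, ← hr1, List.drop_append_of_le_length (by decide)]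
    rfl
  obtain ⟨r2, hr2⟩ := h2
  rw [hdrop11] at hr2
  rw [hEVcons] at hr2
  have hr1' : r1 = EV.drop 1 ++ r2 := by
    have := List.cons.injEq 'e' (EV.drop 1 ++ r2) 'e' r1 ▸ hr2
    exact (List.cons.inj hr2).2.symm
  have hW : txt.drop c = (EV ++ EV.drop 1) ++ r2 := by
    rw [← hr1, hr1', List.append_assoc]
  intro j hj1 hj2 p hp hpre
  have ho1 : 0 < j - c := by omega
  have ho2 : j - c < 11 := by omega
  have hdj : txt.drop j = (EV ++ EV.drop 1).drop (j - c) ++ r2 := by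
    have h : txt.drop j = (txt.drop c).drop (j - c) := by
      rw [List.drop_drop]; congr 1; omega
    have h23 : (EV ++ EV.drop 1).length = 23 := by decide
    rw [h, hW, List.drop_append_of_le_length (by omega)]
  rw [hdj] at hpre
  have hlen : p.length ≤ ((EV ++ EV.drop 1).drop (j - c)).length := by
    have h13 := cmds_len p hp
    simp only [List.length_drop, List.length_append]
    have : EV.length = 12 := by decide
    have : (EV.drop 1).length = 11 := by decide
    omega
  have hpw : p <+: (EV ++ EV.drop 1).drop (j - c) := by
    rcases List.prefix_or_prefix_of_prefix hpre
      (List.prefix_append ((EV ++ EV.drop 1).drop (j - c)) r2) with h | h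
    · exact h
    · have := List.IsPrefix.eq_of_length_le h (by omega)
      rw [← this]
    
  exact no_cmd_in_window (j - c) ho2 ho1 p hp hpw

-- no phrase matches at or past the end of the text
theorem no_match_past (txt p : List Char) (hp : p ≠ []) (j : Nat)
    (hj : txt.length ≤ j) : ¬ p <+: txt.drop j := by
  intro h
  rw [List.drop_eq_nil_of_le hj] at h
  exact hp (List.prefix_nil.mp h)

-- the effect of A's inner while-loop on the state, given the chain's last hit
def stepState (st : Option (List Char) × Option Nat) (p : List Char)
    (m? : Option Nat) : Option (List Char) × Option Nat :=
  match m? with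
  | none => st
  | some m =>
    match st.2 with
    | none => (some p, some m)
    | some b => if b ≤ m then (some p, some m) else st

-- A's inner while-loop: either the phrase never occurs at or after `start`
-- and the state is unchanged, or the loop's last recorded index c is an
-- occurrence with no further occurrence at or beyond c + |p|, and the state
-- is updated exactly as by stepState at c.
theorem whileFind_eq (txt p : List Char) (hp : p ≠ []) :
    ∀ start best bestIdx, start ≤ txt.length →
      (whileFind txt p start best bestIdx = (best, bestIdx) ∧
        ∀ j, start ≤ j → ¬ p <+: txt.drop j) ∨
      (∃ c, start ≤ c ∧ p <+: txt.drop c ∧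
        (∀ j, c + p.length ≤ j → ¬ p <+: txt.drop j) ∧
        whileFind txt p start best bestIdx = stepState (best, bestIdx) p (some c)) := by
  intro start
  obtain ⟨n, hn⟩ : ∃ n, txt.length + 1 - start = n := ⟨_, rfl⟩
  induction n using Nat.strong_induction_on generalizing start with
  | _ n ih =>
  intro best bestIdx hstart
  by_cases hidx : PySem.Chars.findFrom txt p (start : Int) none = -1
  · left
    constructor
    · rw [whileFind]
      simp only [if_pos hidx]
    · have hninf := (PySem.Chars.findFrom_natCast_eq_neg_one_iff txt p start hstart).mp hidx
      intro j hj hpre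
      apply hninf
      have hsub : p <+: (txt.drop start).drop (j - start) := by
        rw [List.drop_drop]
        have heq : start + (j - start) = j := by omega
        rw [heq]; exact hpre
      exact hsub.isInfix.trans (List.drop_suffix _ _).isInfix
  · obtain ⟨hge, hocc, hmin⟩ :=
      PySem.Chars.findFrom_natCast_spec txt p start hstart hidx
    have hilt : (PySem.Chars.findFrom txt p (start : Int) none).toNat < txt.length := by
      by_contra hc
      exact no_match_past txt p hp _ (by omega) hocc
    have hiplen : (PySem.Chars.findFrom txt p (start : Int) none).toNat + p.length ≤ txt.length := by
      have := hocc.length_le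
      simp only [List.length_drop] at this
      omega
    have hstarti : start ≤ (PySem.Chars.findFrom txt p (start : Int) none).toNat := by
      omega
    have hplen : 0 < p.length := List.length_pos_iff.mpr hp
    have hguard : start < (PySem.Chars.findFrom txt p (start : Int) none).toNat + p.length ∧
        (PySem.Chars.findFrom txt p (start : Int) none).toNat + p.length ≤ txt.length :=
      ⟨by omega, hiplen⟩
    rw [whileFind]
    simp only [if_neg hidx, dif_pos hguard]
    set i := (PySem.Chars.findFrom txt p (start : Int) none).toNat with hi
    have hrec := ih (txt.length + 1 - (i + p.length)) (by omega) (i + p.length) (by omega)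
      (if (match bestIdx with | none => true | some b => decide (b ≤ i)) then some p else best)
      (if (match bestIdx with | none => true | some b => decide (b ≤ i)) then some i else bestIdx)
      (by omega)
    rcases hrec with ⟨heq, hno⟩ | ⟨c, hc1, hc2, hc3, heq⟩
    · right
      refine ⟨i, hstarti, hocc, hno, ?_⟩
      rw [heq]
      cases bestIdx with
      | none => rfl
      | some b =>
        by_cases hb : b ≤ i
        · simp only [decide_eq_true hb, if_pos]
          show ((some p : Option (List Char)), (some i : Option Nat)) =
            (if b ≤ i then (some p, some i) else (best, some b))
          rw [if_pos hb]
        · simp only [decide_eq_false hb, Bool.false_eq_true, ite_false]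
          show ((best : Option (List Char)), (some b : Option Nat)) =
            (if b ≤ i then (some p, some i) else (best, some b))
          rw [if_neg hb]
    · right
      refine ⟨c, by omega, hc2, hc3, ?_⟩
      rw [heq]
      have hic : i ≤ c := by omega
      cases bestIdx with
      | none =>
        show stepState (some p, some i) p (some c) = stepState (best, none) p (some c)
        show (if i ≤ c then ((some p : Option (List Char)), some c) else (some p, some i)) =
          ((some p : Option (List Char)), some c)
        rw [if_pos hic]
      | some b =>
        by_cases hb : b ≤ i
        · simp only [decide_eq_true hb, if_pos]
          show (if i ≤ c then ((some p : Option (List Char)), some c) else (some p, some i)) =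
            (if b ≤ c then (some p, some c) else (best, some b))
          rw [if_pos hic, if_pos (by omega)]
        · simp only [decide_eq_false hb, Bool.false_eq_true, ite_false]

-- the fold when no phrase occurs at all
theorem foldA_none (txt : List Char) (qs : List (List Char))
    (hsub : ∀ p ∈ qs, p ∈ CMDSL)
    (hall : ∀ j, ∀ p ∈ CMDSL, ¬ p <+: txt.drop j) :
    ∀ st : Option (List Char) × Option Nat,
      qs.foldl (fun st p => whileFind txt p 0 st.1 st.2) st = st := by
  induction qs with
  | nil => intro st; rfl
  | cons p ps ihq =>
    intro st
    have hp := hsub p (by simp)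
    rcases whileFind_eq txt p (cmds_nonempty p hp) 0 st.1 st.2 (Nat.zero_le _) with
      ⟨heq, -⟩ | ⟨c, -, hc2, -, -⟩
    · simp only [List.foldl_cons, heq]
      exact ihq (fun r hr => hsub r (List.mem_cons_of_mem _ hr)) st
    · exact absurd hc2 (hall c p hp)

-- once the winner q with dominant index c is installed, it stays
theorem foldA_keep (txt : List Char) (q : List Char) (c : Nat) (qs : List (List Char))
    (hsub : ∀ p ∈ qs, p ∈ CMDSL ∧ p ≠ q)
    (hdom : ∀ p ∈ CMDSL, p ≠ q → ∀ j, p <+: txt.drop j → j < c) :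
    qs.foldl (fun st p => whileFind txt p 0 st.1 st.2) (some q, some c)
      = (some q, some c) := by
  induction qs with
  | nil => rfl
  | cons p ps ihq =>
    obtain ⟨hp, hpq⟩ := hsub p (by simp)
    rcases whileFind_eq txt p (cmds_nonempty p hp) 0 (some q) (some c) (Nat.zero_le _) with
      ⟨heq, -⟩ | ⟨cp, -, hc2, -, heq⟩
    · simp only [List.foldl_cons, heq]
      exact ihq (fun r hr => hsub r (List.mem_cons_of_mem _ hr))
    · have hcp : cp < c := hdom p hp hpq cp hc2
      simp only [List.foldl_cons, heq]
      have hstep : stepState (some q, some c) p (some cp) = (some q, some c) := by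
        show (if c ≤ cp then ((some p : Option (List Char)), some cp) else (some q, some c))
          = (some q, some c)
        rw [if_neg (by omega)]
      rw [hstep]
      exact ihq (fun r hr => hsub r (List.mem_cons_of_mem _ hr))

-- the main fold lemma: A's fold ends with best = q, the phrase at the
-- globally latest occurrence M
theorem foldA_main (txt : List Char) (q : List Char) (M : Nat)
    (hq : q ∈ CMDSL) (hqM : q <+: txt.drop M)
    (hmax : ∀ p ∈ CMDSL, ∀ j, p <+: txt.drop j → j ≤ M) :
    ∀ qs : List (List Char), (∀ p ∈ qs, p ∈ CMDSL) → qs.Nodup → q ∈ qs →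
    ∀ best bestIdx,
      (bestIdx = none ∨ ∃ b p', bestIdx = some b ∧ p' ∈ CMDSL ∧ p' ≠ q ∧ p' <+: txt.drop b) →
      (qs.foldl (fun st p => whileFind txt p 0 st.1 st.2) (best, bestIdx)).1 = some q := by
  intro qs
  induction qs with
  | nil => intro _ _ hqmem; cases hqmem
  | cons p ps ihq =>
    intro hsub hnd hqmem best bestIdx hinv
    by_cases hpq : p = q
    · subst hpq
      -- q's own loop: it occurs (at M), so we get its chain value c
      rcases whileFind_eq txt p (cmds_nonempty p hq) 0 best bestIdx (Nat.zero_le _) with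
        ⟨-, hno⟩ | ⟨c, -, hc2, hc3, heq⟩
      · exact absurd hqM (hno M (Nat.zero_le _))
      · have hcM : c ≤ M := hmax p hq c hc2
        have hMc : M < c + p.length := by
          by_contra hcon
          exact hc3 M (by omega) hqM
        -- dominance: every occurrence of another phrase lies strictly below c
        have hdom : ∀ r ∈ CMDSL, r ≠ p → ∀ j, r <+: txt.drop j → j < c := by
          intro r hr hrp j hj
          have hjM : j ≤ M := hmax r hr j hj
          have hjqM : j ≠ M := fun h' => hrp (uniq_at (txt.drop M) r p hr hq (h' ▸ hj) hqM)
          by_cases hcMeq : c = M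
          · omega
          · -- overlapped case: p = EV and M = c + 11
            have hlt : c < M := by omega
            have hb := close_occ_border txt p hlt (by omega) hc2 hqM
            obtain ⟨hEV, hd⟩ := cmds_border p hq (M - c)
              (by omega) (by omega) hb
            have hjc : j ≠ c := fun h' =>
              hrp (uniq_at (txt.drop c) r p hr hq (h' ▸ hj) hc2)
            subst hEV
            have hM11 : M = c + 11 := by omega
            have hnin := no_cmd_inside txt c hc2 (hM11 ▸ hqM)
            by_contra hcon
            exact hnin j (by omega) (by omega) r hr hj
        have hstep : stepState (best, bestIdx) p (some c) = (some p, some c) := by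
          rcases hinv with h' | ⟨b, p', hb, hp', hp'q, hbocc⟩
          · subst h'; rfl
          · subst hb
            have : b < c := hdom p' hp' hp'q b hbocc
            show (if b ≤ c then ((some p : Option (List Char)), some c) else (best, some b))
              = (some p, some c)
            rw [if_pos (by omega)]
        simp only [List.foldl_cons, heq, hstep]
        rw [foldA_keep txt p c ps ?hsub hdom]
        case hsub =>
          intro r hr
          refine ⟨hsub r (List.mem_cons_of_mem _ hr), ?_⟩
          intro hrq
          subst hrq
          exact (List.nodup_cons.mp hnd).1 hr
    · have hq' : q ∈ ps := by
        rcases List.mem_cons.mp hqmem with h' | h'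
        · exact absurd h'.symm hpq
        · exact h'
      have hp := hsub p (by simp)
      rcases whileFind_eq txt p (cmds_nonempty p hp) 0 best bestIdx (Nat.zero_le _) with
        ⟨heq, -⟩ | ⟨c, -, hc2, -, heq⟩
      · simp only [List.foldl_cons, heq]
        exact ihq (fun r hr => hsub r (List.mem_cons_of_mem _ hr))
          (List.nodup_cons.mp hnd).2 hq' best bestIdx hinv
      · simp only [List.foldl_cons, heq]
        have hinv' : (stepState (best, bestIdx) p (some c)).2 = none ∨
            ∃ b p', (stepState (best, bestIdx) p (some c)).2 = some b ∧
              p' ∈ CMDSL ∧ p' ≠ q ∧ p' <+: txt.drop b := by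
          rcases hinv with h' | ⟨b, p', hb, hp', hp'q, hbocc⟩
          · subst h'
            exact Or.inr ⟨c, p, rfl, hp, hpq, hc2⟩
          · subst hb
            by_cases hbc : b ≤ c
            · refine Or.inr ⟨c, p, ?_, hp, hpq, hc2⟩
              show (if b ≤ c then ((some p : Option (List Char)), some c) else (best, some b)).2
                = some c
              rw [if_pos hbc]
            · refine Or.inr ⟨b, p', ?_, hp', hp'q, hbocc⟩
              show (if b ≤ c then ((some p : Option (List Char)), some c) else (best, some b)).2
                = some b
              rw [if_neg hbc]
        have := ihq (fun r hr => hsub r (List.mem_cons_of_mem _ hr))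
          (List.nodup_cons.mp hnd).2 hq'
          (stepState (best, bestIdx) p (some c)).1
          (stepState (best, bestIdx) p (some c)).2 hinv'
        simpa using this

theorem cmds_nodup : CMDSL.Nodup := by unfold CMDSL VOICE_COMMANDS; decide

-- B-side lemmas
theorem bFindAt_eq_none_iff (txt : List Char) (j : Nat) (l : List (List Char)) :
    bFindAt txt j l = none ↔ ∀ p ∈ l, ¬ p <+: txt.drop j := by
  induction l with
  | nil => simp [bFindAt]
  | cons p ps ih =>
    rw [bFindAt]
    split
    · rename_i h
      rw [PySem.Chars.startswith_iff] at h
      simp only [List.mem_cons]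
      constructor
      · intro hc; cases hc
      · intro hall; exact absurd h (hall p (Or.inl rfl))
    · rename_i h
      rw [ih]
      constructor
      · rintro hall p' hp'
        rcases List.mem_cons.mp hp' with h' | h'
        · subst h'
          intro hpre
          exact h ((PySem.Chars.startswith_iff _ _).mpr hpre)
        · exact hall p' h'
      · intro hall p' hp'
        exact hall p' (List.mem_cons_of_mem _ hp')

theorem bFindAt_eq_some (txt : List Char) (j : Nat) (l : List (List Char)) (p : List Char)
    (h : bFindAt txt j l = some p) : p ∈ l ∧ p <+: txt.drop j := by
  induction l with
  | nil => cases h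
  | cons r rs ih =>
    rw [bFindAt] at h
    split at h
    · rename_i hs
      cases h
      exact ⟨by simp, (PySem.Chars.startswith_iff _ _).mp hs⟩
    · obtain ⟨h1, h2⟩ := ih h
      exact ⟨List.mem_cons_of_mem _ h1, h2⟩

theorem bFindAt_intro (txt : List Char) (j : Nat) (l : List (List Char)) (q : List Char)
    (hq : q ∈ l) (hpre : q <+: txt.drop j)
    (huniq : ∀ p ∈ l, p <+: txt.drop j → p = q) :
    bFindAt txt j l = some q := by
  induction l with
  | nil => cases hq
  | cons r rs ih =>
    rw [bFindAt]
    split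
    · rename_i hs
      rw [huniq r (by simp) ((PySem.Chars.startswith_iff _ _).mp hs)]
    · rename_i hs
      have hs' : ¬ r <+: txt.drop j :=
        fun h' => hs ((PySem.Chars.startswith_iff _ _).mpr h')
      have hqr : q ≠ r := fun h' => hs' (h' ▸ hpre)
      have hq' : q ∈ rs := by
        rcases List.mem_cons.mp hq with h' | h'
        · exact absurd h' hqr
        · exact h'
      exact ih hq' (fun p hp => huniq p (List.mem_cons_of_mem _ hp))

theorem bScan_eq_none (txt : List Char) (n : Nat)
    (h : ∀ j < n, ∀ p ∈ (VOICE_COMMANDS.map String.toList).reverse, ¬ p <+: txt.drop j) :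
    bScan txt n = none := by
  induction n with
  | zero => rfl
  | succ j ih =>
    rw [bScan]
    rw [(bFindAt_eq_none_iff txt j _).mpr (h j (by omega))]
    exact ih (fun j' hj' => h j' (by omega))

theorem bScan_eq_some (txt : List Char) (n M : Nat) (q : List Char)
    (hMn : M < n)
    (hfind : bFindAt txt M ((VOICE_COMMANDS.map String.toList).reverse) = some q)
    (habove : ∀ j, M < j → j < n →
      ∀ p ∈ (VOICE_COMMANDS.map String.toList).reverse, ¬ p <+: txt.drop j) :
    bScan txt n = some q := by
  induction n with
  | zero => omega
  | succ j ih =>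
    rw [bScan]
    by_cases hj : j = M
    · subst hj; rw [hfind]
    · rw [(bFindAt_eq_none_iff txt j _).mpr (habove j (by omega) (by omega))]
      exact ih (by omega) (fun j' h1 h2 => habove j' h1 (by omega))

theorem bScan_mem (txt : List Char) (n : Nat) (p : List Char)
    (h : bScan txt n = some p) : p ∈ (VOICE_COMMANDS.map String.toList).reverse := by
  induction n with
  | zero => cases h
  | succ j ih =>
    rw [bScan] at h
    cases hf : bFindAt txt j ((VOICE_COMMANDS.map String.toList).reverse) with
    | some r =>
      rw [hf] at h; cases h
      exact (bFindAt_eq_some txt j _ _ hf).1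
    | none =>
      rw [hf] at h
      exact ih h

-- the core equivalence, over the normalized character list
theorem main_core (txt : List Char) :
    (CMDSL.foldl (fun st p => whileFind txt p 0 st.1 st.2)
      ((none, none) : Option (List Char) × Option Nat)).1
      = bScan txt txt.length := by
  by_cases hex : ∃ j < txt.length, ∃ p ∈ CMDSL, p <+: txt.drop j
  · classical
    set P : Nat → Prop := fun j => ∃ p ∈ CMDSL, p <+: txt.drop j with hP
    obtain ⟨j0, hj0, hPj0⟩ := hex
    set M := Nat.findGreatest P txt.length with hM
    have hPM : P M := Nat.findGreatest_spec (P := P) (n := txt.length)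
      (Nat.le_of_lt hj0) hPj0
    obtain ⟨q, hqmem, hqpre⟩ := hPM
    have hmax : ∀ p ∈ CMDSL, ∀ j, p <+: txt.drop j → j ≤ M := by
      intro p hp j hpre
      by_contra hc
      by_cases hjl : j ≤ txt.length
      · exact Nat.findGreatest_is_greatest (P := P) (n := txt.length)
          (by omega) hjl ⟨p, hp, hpre⟩
      · exact no_match_past txt p (cmds_nonempty p hp) j (by omega) hpre
    have hMlt : M < txt.length := by
      rcases Nat.lt_or_ge M txt.length with h | h
      · exact h
      · exact absurd hqpre (no_match_past txt q (cmds_nonempty q hqmem) M h)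
    rw [foldA_main txt q M hqmem hqpre hmax CMDSL (fun p hp => hp) cmds_nodup hqmem
      none none (Or.inl rfl)]
    have hfind : bFindAt txt M ((VOICE_COMMANDS.map String.toList).reverse) = some q := by
      apply bFindAt_intro
      · rw [List.mem_reverse]; exact hqmem
      · exact hqpre
      · intro p hp hpre
        exact uniq_at (txt.drop M) p q (List.mem_reverse.mp hp) hqmem hpre hqpre
    rw [bScan_eq_some txt txt.length M q hMlt hfind
      (fun j h1 h2 p hp hpre => by
        have := hmax p (List.mem_reverse.mp hp) j hpre
        omega)]
  · push Not at hex
    have hall : ∀ j, ∀ p ∈ CMDSL, ¬ p <+: txt.drop j := by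
      intro j p hp hpre
      rcases Nat.lt_or_ge j txt.length with h | h
      · exact hex j h p hp hpre
      · exact no_match_past txt p (cmds_nonempty p hp) j h hpre
    rw [foldA_none txt CMDSL (fun p hp => hp) hall]
    rw [bScan_eq_none txt txt.length
      (fun j hj p hp => hall j p (List.mem_reverse.mp hp))]

-- ===== VERDICT (by name: the statement is the Claim_ definition above) =====
theorem parse_voice_commands_spec : Claim_equal_parse_voice_commands := by
  intro text _
  unfold Spec_parse_voice_commands parse_voice_commands parse_voice_commands_alt
  show (match (VOICE_COMMANDS.foldl
      (fun st p => whileFind (PySem.Chars.join [' '] (PySem.Chars.split₀ text.toList))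
        p.toList 0 st.1 st.2)
      ((none, none) : Option (List Char) × Option Nat)).1 with
    | some b => if b.isEmpty then [] else [String.ofList b]
    | none => ([] : List String)) =
    (match bScan (PySem.Chars.join [' '] (PySem.Chars.split₀ text.toList))
        (PySem.Chars.join [' '] (PySem.Chars.split₀ text.toList)).length with
    | some p => [String.ofList p]
    | none => ([] : List String))
  generalize PySem.Chars.join [' '] (PySem.Chars.split₀ text.toList) = txt
  have hA : VOICE_COMMANDS.foldl (fun st p => whileFind txt p.toList 0 st.1 st.2)
      ((none, none) : Option (List Char) × Option Nat)
      = CMDSL.foldl (fun st p => whileFind txt p 0 st.1 st.2)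
      ((none, none) : Option (List Char) × Option Nat) := by
    rw [CMDSL, List.foldl_map]
  rw [hA, main_core txt]
  cases hb : bScan txt txt.length with
  | none => rfl
  | some p =>
    have hmem : p ∈ CMDSL := by
      have := bScan_mem txt txt.length p hb
      rwa [List.mem_reverse] at this
    have hne : p.isEmpty = false := by
      cases hpe : p.isEmpty
      · rfl
      · exact absurd (List.isEmpty_iff.mp hpe) (cmds_nonempty p hmem)
    simp [hne]
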